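-- pv_equiv track=rewrite | github.com/PeterJensen/aquaq | solve-36.py | coverAll
-- ===== SOURCE A (Python) =====
-- def coverAll(grid, pairs):
--   ps = []
--   for p in pairs:
--     p1, p2 = p
--     ps.append(p1+p2)
--     ps.append(p1*p2)
--   for gn in grid:
--     if gn not in ps:
--       return False
--   return True
-- ===== SOURCE B (Python) =====
-- def coverAll(grid, pairs):
--   uncovered = set(grid)
--   for p1, p2 in pairs:
--     uncovered.discard(p1 + p2)
--     uncovered.discard(p1 * p2)
--     if not uncovered:
--       return True
--   return not uncovered
-- ===== Notes on version B (the rewrite author's own statement) =====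
-- stated objective: alternative
-- what changed: B inverts the traversal: instead of building a table of all pair sums/products and scanning it per grid number, B builds the set of uncovered grid numbers once and makes a single pass over the pairs, discarding each pair's sum and product from the set with early exit when it empties.
import Mathlib
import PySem

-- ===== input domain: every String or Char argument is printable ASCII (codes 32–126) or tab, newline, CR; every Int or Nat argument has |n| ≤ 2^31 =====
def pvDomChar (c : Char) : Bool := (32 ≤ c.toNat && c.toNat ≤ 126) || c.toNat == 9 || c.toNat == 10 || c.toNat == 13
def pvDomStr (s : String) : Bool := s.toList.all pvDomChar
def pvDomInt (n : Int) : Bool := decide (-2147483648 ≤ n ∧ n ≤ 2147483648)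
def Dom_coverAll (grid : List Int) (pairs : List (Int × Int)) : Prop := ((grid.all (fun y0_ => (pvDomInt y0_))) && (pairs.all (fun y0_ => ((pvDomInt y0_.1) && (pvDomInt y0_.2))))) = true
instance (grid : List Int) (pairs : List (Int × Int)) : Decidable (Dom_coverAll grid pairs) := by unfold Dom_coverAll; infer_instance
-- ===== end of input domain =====

-- B inverts the traversal: one pass over the pairs discarding each sum/product from the set of
-- uncovered grid numbers (early exit when it empties), instead of A's table build + per-grid scan.

-- ===== PORT A =====
-- the second loop of A: return False on the first gn not in ps
def coverAllLoop (grid : List Int) (ps : List Int) : Bool :=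
  match grid with
  | [] => true
  | gn :: rest => if ¬ ps.contains gn then false else coverAllLoop rest ps

def coverAll (grid : List Int) (pairs : List (Int × Int)) : Bool :=
  let ps := pairs.foldl (fun acc p => (acc ++ [p.1 + p.2]) ++ [p.1 * p.2]) []
  coverAllLoop grid ps

-- ===== PORT B =====
-- the pairs loop of B: discard the pair's sum and product from the uncovered set, early exit when empty
def coverAllAltLoop (pairs : List (Int × Int)) (uncovered : PySem.Set Int) : Bool :=
  match pairs with
  | [] => uncovered.isEmpty
  | p :: rest =>
    let uncovered := PySem.Set.discard (PySem.Set.discard uncovered (p.1 + p.2)) (p.1 * p.2)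
    if uncovered.isEmpty then true else coverAllAltLoop rest uncovered

def coverAll_alt (grid : List Int) (pairs : List (Int × Int)) : Bool :=
  coverAllAltLoop pairs (PySem.Set.ofList grid)

-- ===== PRECONDITION & SPEC =====
def Spec_coverAll (grid : List Int) (pairs : List (Int × Int)) (out : Bool) : Prop := out = coverAll_alt grid pairs
instance (grid : List Int) (pairs : List (Int × Int)) (out : Bool) : Decidable (Spec_coverAll grid pairs out) := by unfold Spec_coverAll; infer_instance

-- ===== CLAIM (what is proved, stated in full; the proofs are below) =====
def Claim_equal_coverAll : Prop := ∀ (grid : List Int) (pairs : List (Int × Int)), Dom_coverAll grid pairs → Spec_coverAll grid pairs (coverAll grid pairs)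

-- ===== LEMMAS AND PROOFS =====

-- characterisation of B's loop: true iff every uncovered element is some pair's sum or product
theorem altLoop_iff (pairs : List (Int × Int)) (unc : List Int) :
    coverAllAltLoop pairs unc = true ↔
      ∀ x ∈ unc, ∃ p ∈ pairs, x = p.1 + p.2 ∨ x = p.1 * p.2 := by
  induction pairs generalizing unc with
  | nil =>
    simp [coverAllAltLoop, List.isEmpty_iff, List.eq_nil_iff_forall_not_mem]
  | cons p rest ih =>
    simp only [coverAllAltLoop]
    by_cases he : (PySem.Set.discard (PySem.Set.discard unc (p.1 + p.2)) (p.1 * p.2)).isEmpty = true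
    · simp only [he, if_true, true_iff]
      intro x hx
      have : x ∉ PySem.Set.discard (PySem.Set.discard unc (p.1 + p.2)) (p.1 * p.2) := by
        rw [List.isEmpty_iff] at he; simp [he]
      simp only [PySem.Set.mem_discard] at this
      by_cases h1 : x = p.1 + p.2
      · exact ⟨p, by simp, Or.inl h1⟩
      by_cases h2 : x = p.1 * p.2
      · exact ⟨p, by simp, Or.inr h2⟩
      · exact absurd ⟨⟨hx, h1⟩, h2⟩ this
    · rw [if_neg he, ih]
      constructor
      · intro h x hx
        by_cases h1 : x = p.1 + p.2
        · exact ⟨p, by simp, Or.inl h1⟩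
        by_cases h2 : x = p.1 * p.2
        · exact ⟨p, by simp, Or.inr h2⟩
        · obtain ⟨q, hq, hv⟩ := h x (by simp [PySem.Set.mem_discard, hx, h1, h2])
          exact ⟨q, by simp [hq], hv⟩
      · intro h x hx
        simp only [PySem.Set.mem_discard] at hx
        obtain ⟨⟨hxu, h1⟩, h2⟩ := hx
        obtain ⟨q, hq, hv⟩ := h x hxu
        rcases List.mem_cons.mp hq with rfl | hq'
        · rcases hv with rfl | rfl
          · exact absurd rfl h1
          · exact absurd rfl h2
        · exact ⟨q, hq', hv⟩

-- the table-membership test of A equals a direct scan over the pairs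
theorem contains_table (pairs : List (Int × Int)) (acc : List Int) (gn : Int) :
    ((pairs.foldl (fun acc p => (acc ++ [p.1 + p.2]) ++ [p.1 * p.2]) acc).contains gn)
      = (acc.contains gn || pairs.any (fun p => gn == p.1 + p.2 || gn == p.1 * p.2)) := by
  induction pairs generalizing acc with
  | nil => simp
  | cons p rest ih =>
    simp only [List.foldl_cons, ih, List.any_cons]
    have h1 : (gn == p.1 + p.2) = decide (gn = p.1 + p.2) := rfl
    have h2 : (gn == p.1 * p.2) = decide (gn = p.1 * p.2) := rfl
    rw [h1, h2]
    simp [Bool.or_assoc, Bool.or_comm, Bool.or_left_comm]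

theorem loop_eq_all (grid : List Int) (ps : List Int) :
    coverAllLoop grid ps = grid.all (fun gn => ps.contains gn) := by
  induction grid with
  | nil => rfl
  | cons gn rest ih =>
    by_cases h : ps.contains gn <;> simp [coverAllLoop, ih]

theorem coverAll_iff (grid : List Int) (pairs : List (Int × Int)) :
    coverAll grid pairs = true ↔
      ∀ x ∈ grid, ∃ p ∈ pairs, x = p.1 + p.2 ∨ x = p.1 * p.2 := by
  unfold coverAll
  simp only [loop_eq_all, contains_table, List.contains_nil, Bool.false_or,
    List.all_eq_true, List.any_eq_true]
  constructor
  · intro h x hx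
    obtain ⟨p, hp, hv⟩ := h x hx
    exact ⟨p, hp, by simpa using hv⟩
  · intro h x hx
    obtain ⟨p, hp, hv⟩ := h x hx
    exact ⟨p, hp, by simpa using hv⟩

-- ===== VERDICT (by name: the statement is the Claim_ definition above) =====
theorem coverAll_spec : Claim_equal_coverAll := by
  intro grid pairs _
  unfold Spec_coverAll coverAll_alt
  rw [Bool.eq_iff_iff, coverAll_iff, altLoop_iff]
  constructor
  · intro h x hx
    exact h x (by simpa [PySem.Set.mem_ofList] using hx)
  · intro h x hx
    exact h x (by simpa [PySem.Set.mem_ofList] using hx)
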